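-- pv_equiv track=rewrite | github.com/sapienzastudents/exercises | Progettazione di Algoritmi/canale2/2018_2019/esercizi/partizionamento_attivita.py | partizionamento_attivita
-- ===== SOURCE A (Python) =====
-- from heapq import heappush, heappop
--
-- def partizionamento_attivita(lista):
--     '''Ritorna un dizionario con il partizionamento della attività per ogni
--        operaio.'''
--
--     partizionamento = {0:set()}
--     lista = sorted(lista)
--
--     liberi = []
--     heappush(liberi, (0, 0))
--
--     ultimo_operaio = 0
--     for inizio, fine in lista:
--         # Controllo inzio con il primo elemento dell'heap (il minimo), senza
--         # estrarlo.
--         if inizio >= liberi[0][0]: # (libero, op.°) <- scelgo 'libero'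
--             _, operaio = heappop(liberi)
--             partizionamento[operaio].add((inizio, fine))
--             heappush(liberi, (fine + 1, operaio))
--
--         # Nuovo operaio perchè quelli di prima sono tutti occupati.
--         else:
--             ultimo_operaio += 1
--             partizionamento[ultimo_operaio] = {(inizio, fine)}
--             heappush(liberi, (fine + 1, ultimo_operaio))
--
--     return partizionamento
-- ===== SOURCE B (Python) =====
-- def partizionamento_attivita(lista):
--     '''Ritorna un dizionario con il partizionamento della attività per ogni
--        operaio.'''
--     # Phase 1: worker ids are consecutive, so track free times in a plain list
--     # indexed by worker id and record each assignment as (worker, activity).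
--     free = [0]
--     assegnazioni = []
--     for inizio, fine in sorted(lista):
--         m = min(free)
--         if inizio >= m:
--             operaio = free.index(m)
--             free[operaio] = fine + 1
--         else:
--             operaio = len(free)
--             free.append(fine + 1)
--         assegnazioni.append((operaio, (inizio, fine)))
--     # Phase 2: group the assignments per worker.
--     return {w: {att for ww, att in assegnazioni if ww == w}
--             for w in range(len(free))}
-- ===== Notes on version B (the rewrite author's own statement) =====
-- stated objective: alternative
-- what changed: Replaces A's single-pass heap-plus-dict construction by two staged passes: pass one tracks next-free times in a plain list indexed by worker id (min + index scan) and emits a flat (worker, activity) assignment list, pass two groups that list into the worker dict with a range comprehension.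
import Mathlib
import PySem

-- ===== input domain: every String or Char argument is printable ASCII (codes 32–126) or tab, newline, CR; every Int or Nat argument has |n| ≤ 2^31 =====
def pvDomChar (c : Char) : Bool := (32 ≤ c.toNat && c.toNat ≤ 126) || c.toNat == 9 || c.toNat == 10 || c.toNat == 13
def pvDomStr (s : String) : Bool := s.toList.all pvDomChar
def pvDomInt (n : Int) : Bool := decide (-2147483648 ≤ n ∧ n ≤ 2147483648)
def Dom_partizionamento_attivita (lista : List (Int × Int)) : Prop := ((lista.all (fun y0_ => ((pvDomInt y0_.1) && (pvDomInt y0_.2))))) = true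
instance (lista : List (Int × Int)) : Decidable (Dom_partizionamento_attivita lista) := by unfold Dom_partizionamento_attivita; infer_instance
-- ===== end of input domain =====

-- B replaces A's single-pass heap+dict construction by two staged passes: an assignment
-- pass over a plain list of per-worker free times (min + index scan), then a grouping
-- pass building the worker dict (alternative decomposition, not faster).


-- ===== PORT A =====
-- lexicographic ≤ / < on (Int × Int): Python's tuple comparison
def pvLexLe (a b : Int × Int) : Bool := decide (a.1 < b.1 ∨ (a.1 = b.1 ∧ a.2 ≤ b.2))

-- heapq modelled as a list kept sorted by (free_time, id): heappush = ordered insert,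
-- heappop = take the head.  Exact for A: every queued pair carries a distinct worker id,
-- so the sequence of popped minima (and the peeked root liberi[0]) is fully determined.
def pvHeapPush (x : Int × Int) : List (Int × Int) → List (Int × Int)
  | [] => [x]
  | y :: ys => if pvLexLe x y then x :: y :: ys else y :: pvHeapPush x ys

def pvGoA : List (Int × Int) → PySem.Dict Int (PySem.Set (Int × Int)) → List (Int × Int) → Int → PySem.Dict Int (PySem.Set (Int × Int))
  | [], part, _, _ => part
  | (i, f) :: rest, part, liberi, ultimo =>
    match liberi with
    | [] => part  -- unreachable: liberi is never empty
    | (t0, w0) :: lib =>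
      if t0 ≤ i then
        -- partizionamento[operaio].add(..): the lookup must succeed (KeyError otherwise)
        match part.get? w0 with
        | some s => pvGoA rest (part.insert w0 (PySem.Set.add s (i, f))) (pvHeapPush (f + 1, w0) lib) ultimo
        | none => part  -- unreachable: every popped worker id is a key
      else
        pvGoA rest (part.insert (ultimo + 1) (PySem.Set.ofList [(i, f)])) (pvHeapPush (f + 1, ultimo + 1) ((t0, w0) :: lib)) (ultimo + 1)

def partizionamento_attivita (lista : List (Int × Int)) : List (Int × List (Int × Int)) :=
  (pvGoA (PySem.List.sorted2 lista Prod.fst Prod.snd)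
    (PySem.Dict.ofList [((0 : Int), (PySem.Set.empty : PySem.Set (Int × Int)))])
    [((0 : Int), (0 : Int))] 0).items

-- ===== PORT B =====
-- pass 1: free[w] = next free instant of worker w; emit (worker, activity) pairs
def pvAssignB : List (Int × Int) → List Int → List (Int × (Int × Int)) → List Int × List (Int × (Int × Int))
  | [], free, asseg => (free, asseg)
  | (i, f) :: rest, free, asseg =>
    match PySem.List.min? free (fun x => x) with
    | none => (free, asseg)  -- unreachable: free is never empty
    | some m =>
      if m ≤ i then
        match PySem.List.index? free m with
        | none => (free, asseg)  -- unreachable: m ∈ free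
        | some w => pvAssignB rest (free.set w (f + 1)) (asseg ++ [((w : Int), (i, f))])
      else
        pvAssignB rest (free ++ [f + 1]) (asseg ++ [((free.length : Int), (i, f))])

-- pass 2: {att for ww, att in assegnazioni if ww == w}
def pvGroupB (asseg : List (Int × (Int × Int))) (w : Int) : PySem.Set (Int × Int) :=
  PySem.Set.ofList ((asseg.filter (fun p => p.1 == w)).map Prod.snd)

def partizionamento_attivita_alt (lista : List (Int × Int)) : List (Int × List (Int × Int)) :=
  let st := pvAssignB (PySem.List.sorted2 lista Prod.fst Prod.snd) [0] []
  ((PySem.List.pyRange 0 ((st.1.length : Int)) 1).foldl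
      (fun d w => d.insert w (pvGroupB st.2 w)) PySem.Dict.empty).items

-- ===== PRECONDITION & SPEC =====
def Spec_partizionamento_attivita (lista : List (Int × Int)) (out : List (Int × List (Int × Int))) : Prop := out = partizionamento_attivita_alt lista
instance (lista : List (Int × Int)) (out : List (Int × List (Int × Int))) : Decidable (Spec_partizionamento_attivita lista out) := by unfold Spec_partizionamento_attivita; infer_instance

-- ===== CLAIM (what is proved, stated in full; the proofs are below) =====
def Claim_equal_partizionamento_attivita : Prop := ∀ (lista : List (Int × Int)), Dom_partizionamento_attivita lista → Spec_partizionamento_attivita lista (partizionamento_attivita lista)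

-- ===== LEMMAS AND PROOFS =====

-- strict lexicographic order, used to state the heap's sortedness invariant
def pvLexLt (a b : Int × Int) : Bool := decide (a.1 < b.1 ∨ (a.1 = b.1 ∧ a.2 < b.2))

-- order facts about pvLexLe / pvLexLt
theorem pvLexLe_refl (a : Int × Int) : pvLexLe a a = true := by
  simp [pvLexLe]

theorem pvLexLt_of_not_le {a b : Int × Int} (h : ¬ pvLexLe a b = true) : pvLexLt b a = true := by
  simp [pvLexLt, pvLexLe] at *; omega

theorem pvLexLt_trans {a b c : Int × Int} (h1 : pvLexLt a b = true) (h2 : pvLexLt b c = true) : pvLexLt a c = true := by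
  simp [pvLexLt] at *; omega

theorem pvLexLt_of_le_of_ne {a b : Int × Int} (h1 : pvLexLe a b = true) (h2 : a ≠ b) : pvLexLt a b = true := by
  rcases a with ⟨a1, a2⟩; rcases b with ⟨b1, b2⟩
  simp [pvLexLe, pvLexLt] at *
  have : ¬ (a1 = b1 ∧ a2 = b2) := by simpa [Prod.ext_iff] using h2
  omega

theorem pvLexLe_of_lt {a b : Int × Int} (h : pvLexLt a b = true) : pvLexLe a b = true := by
  simp [pvLexLe, pvLexLt] at *; omega

-- pvHeapPush is an ordered insert: permutation and strict sortedness
theorem pvHeapPush_perm (x : Int × Int) (l : List (Int × Int)) :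
    (pvHeapPush x l).Perm (x :: l) := by
  induction l with
  | nil => simp [pvHeapPush]
  | cons y ys ih =>
    by_cases h : pvLexLe x y = true
    · simp [pvHeapPush, h]
    · simp only [pvHeapPush, h]
      exact (ih.cons y).trans (List.Perm.swap x y ys)

theorem pvHeapPush_pairwise {x : Int × Int} {l : List (Int × Int)}
    (hs : l.Pairwise (fun a b => pvLexLt a b = true)) (hne : ∀ y ∈ l, x ≠ y) :
    (pvHeapPush x l).Pairwise (fun a b => pvLexLt a b = true) := by
  induction l with
  | nil => simp [pvHeapPush]
  | cons y ys ih =>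
    rcases List.pairwise_cons.mp hs with ⟨hy, hys⟩
    by_cases h : pvLexLe x y = true
    · have hxy : pvLexLt x y = true := pvLexLt_of_le_of_ne h (hne y (by simp))
      simp only [pvHeapPush, h, if_pos]
      refine List.pairwise_cons.mpr ⟨?_, hs⟩
      intro z hz
      rcases List.mem_cons.mp hz with rfl | hz
      · exact hxy
      · exact pvLexLt_trans hxy (hy z hz)
    · have hyx : pvLexLt y x = true := pvLexLt_of_not_le h
      simp only [pvHeapPush, h]
      refine List.pairwise_cons.mpr ⟨?_, ih hys (fun z hz => hne z (by simp [hz]))⟩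
      intro z hz
      rcases (pvHeapPush_perm x ys).mem_iff.mp hz with hz'
      rcases List.mem_cons.mp hz' with rfl | hz'
      · exact hyx
      · exact hy z hz'

-- replacing the (unique) pair with second component w is, up to permutation,
-- removing it and pushing the replacement in front
theorem pvReplace_perm {l : List (Int × Int)} {t w v : Int}
    (hnod : (l.map Prod.snd).Nodup) (hmem : (t, w) ∈ l) :
    (l.map (fun q => if q.2 == w then (v, w) else q)).Perm ((v, w) :: l.erase (t, w)) := by
  induction l with
  | nil => simp at hmem
  | cons q l ih =>
    have hnod' : (q.2 :: l.map Prod.snd).Nodup := by simpa using hnod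
    rcases List.nodup_cons.mp hnod' with ⟨hq, hl⟩
    by_cases hqw : q.2 = w
    · have hq' : q = (t, w) := by
        rcases List.mem_cons.mp hmem with h | h
        · exact h.symm
        · exact absurd (hqw ▸ List.mem_map.mpr ⟨(t, w), h, rfl⟩ : q.2 ∈ l.map Prod.snd) hq
      subst hq'
      have hmap : l.map (fun q => if q.2 == w then (v, w) else q) = l := by
        have : l.map (fun q => if q.2 == w then (v, w) else q) = l.map id := by
          apply List.map_congr_left
          intro p hp
          have hpw : p.2 ≠ w := fun hpw => hq (by rw [hqw]; exact List.mem_map.mpr ⟨p, hp, hpw⟩)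
          simp [hpw]
        simpa using this
      rw [List.erase_cons_head, List.map_cons, if_pos (by simp : (((t, w) : Int × Int).2 == w) = true), hmap]
    · have hne : q ≠ (t, w) := fun h => hqw (by rw [h])
      have hmem' : (t, w) ∈ l := by
        rcases List.mem_cons.mp hmem with h | h
        · exact absurd h.symm hne
        · exact h
      have herase : (q :: l).erase (t, w) = q :: l.erase (t, w) := by
        rw [List.erase_cons_tail]
        simp [hne]
      rw [herase]
      have hbeq : (q.2 == w) = false := by simpa using hqw
      simp only [List.map_cons, hbeq, Bool.false_eq_true, if_false]
      exact ((ih hl hmem').cons q).trans (List.Perm.swap (v, w) q (l.erase (t, w)))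

-- the (free_time, worker_id) pairs encoded by B's free list
def pvPairs (free : List Int) : List (Int × Int) :=
  (List.range free.length).map (fun k => (free.getD k 0, (k : Int)))

theorem mem_pvPairs {free : List Int} {q : Int × Int} :
    q ∈ pvPairs free ↔ ∃ k, k < free.length ∧ q = (free.getD k 0, (k : Int)) := by
  simp [pvPairs, eq_comm]

theorem pvPairs_snd_nodup (free : List Int) : ((pvPairs free).map Prod.snd).Nodup := by
  simp only [pvPairs, List.map_map]
  refine List.nodup_range.map ?_
  intro a b h
  simpa using h

theorem pvPairs_set {free : List Int} {j : Nat} {v : Int} (hj : j < free.length) :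
    pvPairs (free.set j v) =
      (pvPairs free).map (fun q => if q.2 == (j : Int) then (v, (j : Int)) else q) := by
  simp only [pvPairs, List.length_set, List.map_map]
  apply List.map_congr_left
  intro k hk
  have hk' : k < free.length := by simpa using hk
  by_cases hkj : k = j
  · subst hkj
    simp [List.getD_eq_getElem?_getD, hk']
  · have : ((k : Int) == (j : Int)) = false := by
      simp; exact_mod_cast hkj
    simp [Function.comp, this, List.getD_eq_getElem?_getD, List.getElem?_set_ne (by omega : j ≠ k)]

theorem pvPairs_append (free : List Int) (v : Int) :
    pvPairs (free ++ [v]) = pvPairs free ++ [(v, (free.length : Int))] := by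
  simp only [pvPairs, List.length_append, List.length_singleton, List.range_succ, List.map_append]
  congr 1
  · apply List.map_congr_left
    intro k hk
    have hk' : k < free.length := by simpa using hk
    simp [List.getD_eq_getElem?_getD, List.getElem?_append_left hk']
  · simp [List.getD_eq_getElem?_getD]

-- grouping lemmas
theorem pvGroupB_append_self (acc : List (Int × (Int × Int))) (w : Int) (a : Int × Int) :
    pvGroupB (acc ++ [(w, a)]) w = PySem.Set.add (pvGroupB acc w) a := by
  simp [pvGroupB, List.filter_append, PySem.Set.ofList_eq_foldl, List.foldl_append]

theorem pvGroupB_append_ne {w w' : Int} (acc : List (Int × (Int × Int))) (a : Int × Int)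
    (h : w' ≠ w) : pvGroupB (acc ++ [(w, a)]) w' = pvGroupB acc w' := by
  have : (w == w') = false := by simpa using fun e => h e.symm
  simp [pvGroupB, List.filter_append, this]

theorem pvGroupB_fresh {acc : List (Int × (Int × Int))} {w : Int}
    (h : ∀ p ∈ acc, p.1 ≠ w) (a : Int × Int) :
    pvGroupB (acc ++ [(w, a)]) w = PySem.Set.ofList [a] := by
  have hf : acc.filter (fun p => p.1 == w) = [] := by
    apply List.filter_eq_nil_iff.mpr
    intro p hp
    simpa using h p hp
  simp [pvGroupB, List.filter_append, hf]

-- the pass-2 fold over range(len(free)) lists the groups in worker order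
theorem pvItems_range (n : Nat) (g : Int → PySem.Set (Int × Int)) :
    ((PySem.List.pyRange 0 ((n : Nat) : Int) 1).foldl
        (fun d w => d.insert w (g w)) PySem.Dict.empty).items
      = (List.range n).map (fun w : Nat => ((w : Int), g (w : Int))) := by
  rw [PySem.List.pyRange_zero_natCast]
  have h := PySem.Dict.items_foldl_insert_fresh (β := Int)
    ((List.range n).map (fun k : Nat => (k : Int))) id g PySem.Dict.empty
    (by intro a _; simp [pysem])
    (by simp only [List.map_id]
        refine List.nodup_range.map ?_
        intro a b hab; simpa using hab)
  simp only [id] at h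
  rw [h]
  simp [pysem, List.map_map, Function.comp_def, PySem.Dict.empty]

-- coupling invariant between A's heap/dict state and B's free-list/assignment state
def pvInvB (liberi : List (Int × Int)) (free : List Int) (u : Int)
    (part : PySem.Dict Int (PySem.Set (Int × Int))) (acc : List (Int × (Int × Int))) : Prop :=
  liberi.Perm (pvPairs free) ∧
  liberi.Pairwise (fun a b => pvLexLt a b = true) ∧
  u + 1 = (free.length : Int) ∧
  part.items = (List.range free.length).map (fun w : Nat => ((w : Int), pvGroupB acc (w : Int))) ∧
  (∀ p ∈ acc, 0 ≤ p.1 ∧ p.1 < (free.length : Int)) ∧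
  free ≠ []

-- main simulation lemma: under the invariant, A's loop result lists B's groups
theorem pvSim (rest : List (Int × Int)) :
    ∀ (liberi : List (Int × Int)) (free : List Int) (u : Int)
      (part : PySem.Dict Int (PySem.Set (Int × Int))) (acc : List (Int × (Int × Int))),
      pvInvB liberi free u part acc →
      (pvGoA rest part liberi u).items =
        (List.range (pvAssignB rest free acc).1.length).map
          (fun w : Nat => ((w : Int), pvGroupB (pvAssignB rest free acc).2 (w : Int))) := by
  induction rest with
  | nil =>
    intro liberi free u part acc hinv
    simpa only [pvGoA, pvAssignB] using hinv.2.2.2.1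
  | cons a rest ih =>
    rcases a with ⟨i, f⟩
    intro liberi free u part acc hinv
    obtain ⟨hperm, hsort, hu, hitems, hbnd, hfree⟩ := hinv
    -- min(free) is defined
    rcases hmin : PySem.List.min? free (fun x => x) with _ | m
    · exact absurd ((PySem.List.min?_eq_none_iff _ _).mp hmin) hfree
    -- the heap is nonempty
    rcases hlib : liberi with _ | ⟨⟨t0, w0⟩, lib⟩
    · exfalso
      have : pvPairs free = [] := (hlib ▸ hperm).symm.eq_nil
      have : free.length = 0 := by simpa [pvPairs] using congrArg List.length this
      exact hfree (List.length_eq_zero_iff.mp this)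
    subst hlib
    -- the heap root corresponds to an index k0 of free
    have hhead_mem : ((t0, w0) : Int × Int) ∈ pvPairs free :=
      hperm.mem_iff.mp List.mem_cons_self
    obtain ⟨k0, hk0, hk0eq⟩ := mem_pvPairs.mp hhead_mem
    have ht0 : t0 = free.getD k0 0 := congrArg Prod.fst hk0eq
    have hw0 : w0 = (k0 : Int) := congrArg Prod.snd hk0eq
    have ht0g : free[k0] = t0 := by rw [ht0]; exact (List.getD_eq_getElem _ _ hk0).symm
    have ht0mem : t0 ∈ free := ht0g ▸ List.getElem_mem hk0
    -- the heap root is lex-minimal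
    have hheadle : ∀ x ∈ ((t0, w0) : Int × Int) :: lib, pvLexLe (t0, w0) x = true := by
      intro x hx
      rcases List.mem_cons.mp hx with rfl | hx
      · exact pvLexLe_refl _
      · exact pvLexLe_of_lt ((List.pairwise_cons.mp hsort).1 x hx)
    -- t0 equals min(free)
    have hmle : m ≤ t0 := PySem.List.min?_isMin hmin t0 ht0mem
    have ht0m : t0 = m := by
      obtain ⟨km, hkm, hkmv⟩ := List.getElem_of_mem (PySem.List.min?_mem hmin)
      have hpm : ((m, (km : Int)) : Int × Int) ∈ pvPairs free :=
        mem_pvPairs.mpr ⟨km, hkm, by rw [List.getD_eq_getElem _ _ hkm, hkmv]⟩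
      have hle := hheadle _ (hperm.mem_iff.mpr hpm)
      simp only [pvLexLe, decide_eq_true_eq] at hle
      omega
    -- second components of the heap are distinct
    have hsnd_nodup : (((t0, w0) :: lib).map Prod.snd).Nodup :=
      ((hperm.map Prod.snd).nodup_iff).mpr (pvPairs_snd_nodup free)
    by_cases hcond : t0 ≤ i
    · -- assign branch
      have hcondm : m ≤ i := ht0m ▸ hcond
      -- B's index scan finds exactly the heap root's worker id
      have hmm : m ∈ free := PySem.List.min?_mem hmin
      rcases hidx : PySem.List.index? free m with _ | j
      · exact absurd hmm ((PySem.List.index?_eq_none_iff free m).mp hidx)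
      obtain ⟨hj, hjv, hjmin⟩ := PySem.List.getElem_of_index?_eq_some hidx
      have hw0j : w0 = (j : Int) := by
        have hjk0 : j ≤ k0 := by
          by_contra hlt
          exact hjmin k0 (by omega) (ht0m ▸ ht0g)
        have hpj : ((m, (j : Int)) : Int × Int) ∈ pvPairs free :=
          mem_pvPairs.mpr ⟨j, hj, by rw [List.getD_eq_getElem _ _ hj, hjv]⟩
        have hle := hheadle _ (hperm.mem_iff.mpr hpj)
        simp only [pvLexLe, decide_eq_true_eq] at hle
        omega
      -- A's dict lookup returns the group collected so far
      have hkeys_nodup : part.keys.Nodup := by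
        have : part.keys = (List.range free.length).map (fun k : Nat => (k : Int)) := by
          simp [PySem.Dict.keys, hitems, List.map_map, Function.comp_def]
        rw [this]
        refine List.nodup_range.map ?_
        intro a b hab; simpa using hab
      have hget? : part.get? w0 = some (pvGroupB acc w0) := by
        apply PySem.Dict.get?_of_mem_items _ _ hkeys_nodup
        rw [hitems, hw0j]
        exact List.mem_map.mpr ⟨j, List.mem_range.mpr hj, rfl⟩
      have hcont : part.contains w0 = true := by
        rw [PySem.Dict.contains_eq_isSome_get?, hget?]; rfl
      -- one step of each program
      have hA : pvGoA ((i, f) :: rest) part ((t0, w0) :: lib) u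
          = pvGoA rest (part.insert w0 (PySem.Set.add (pvGroupB acc w0) (i, f)))
              (pvHeapPush (f + 1, w0) lib) u := by
        simp [pvGoA, hcond, hget?]
      have hB : pvAssignB ((i, f) :: rest) free acc
          = pvAssignB rest (free.set j (f + 1)) (acc ++ [((j : Int), (i, f))]) := by
        have hidx' := hidx
        rw [PySem.List.index?_eq_idxOf?] at hidx'
        simp [pvAssignB, hmin, hidx', hcondm]
      rw [hA, hB]
      apply ih
      refine ⟨?_, ?_, ?_, ?_, ?_, ?_⟩
      · -- heap ~ updated free list
        have p1 : (pvHeapPush (f + 1, w0) lib).Perm ((f + 1, w0) :: lib) := pvHeapPush_perm _ _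
        have p2 : ((f + 1, w0) :: lib).Perm ((f + 1, w0) :: (pvPairs free).erase (t0, w0)) := by
          refine List.Perm.cons _ ?_
          have := hperm.erase (t0, w0)
          simpa [List.erase_cons_head] using this
        have p3 : ((f + 1, w0) :: (pvPairs free).erase (t0, w0)).Perm (pvPairs (free.set j (f + 1))) := by
          rw [pvPairs_set hj, hw0j]
          exact (pvReplace_perm (pvPairs_snd_nodup free) (hw0j ▸ hhead_mem)).symm
        exact p1.trans (p2.trans p3)
      · -- heap stays strictly sorted
        refine pvHeapPush_pairwise (List.pairwise_cons.mp hsort).2 ?_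
        intro y hy hxy
        have hw0lib : w0 ∉ lib.map Prod.snd := (List.nodup_cons.mp (by simpa using hsnd_nodup)).1
        exact hw0lib (List.mem_map.mpr ⟨y, hy, by rw [← hxy]⟩)
      · simpa using hu
      · -- the dict lists the updated groups
        rw [PySem.Dict.items_insert_of_contains part _ hcont, hitems, List.map_map]
        simp only [List.length_set]
        apply List.map_congr_left
        intro k hk
        by_cases hkj : k = j
        · subst hkj
          have hbeq : (((k : Nat) : Int) == w0) = true := by simp [hw0j]
          simp only [Function.comp_apply, hbeq, if_pos]
          rw [hw0j, pvGroupB_append_self]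
        · have hne : ((k : Int)) ≠ ((j : Int)) := by
            intro h; exact hkj (by exact_mod_cast h)
          have hbeq : (((k : Nat) : Int) == w0) = false := by
            rw [hw0j]; simpa using hne
          simp only [Function.comp_apply, hbeq, Bool.false_eq_true, if_false]
          rw [pvGroupB_append_ne _ _ hne]
      · -- assignment workers stay in range
        intro p hp
        rcases List.mem_append.mp hp with hp | hp
        · have := hbnd p hp
          simp only [List.length_set]
          exact this
        · simp only [List.mem_singleton] at hp
          subst hp
          constructor
          · exact Int.natCast_nonneg j
          · simp only [List.length_set]
            exact_mod_cast hj
      · intro h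
        exact hfree (by simpa using congrArg List.length h)
    · -- new-worker branch
      have hcondm : ¬ m ≤ i := ht0m ▸ hcond
      have hK : u + 1 = (free.length : Int) := hu
      -- every queued worker id is < free.length
      have hidlt : ∀ y ∈ ((t0, w0) : Int × Int) :: lib, y.2 < (free.length : Int) := by
        intro y hy
        obtain ⟨k, hk, hkeq⟩ := mem_pvPairs.mp (hperm.mem_iff.mp hy)
        rw [hkeq]
        show (k : Int) < (free.length : Int)
        exact_mod_cast hk
      have hcont : part.contains (u + 1) = false := by
        rw [PySem.Dict.contains_eq_isSome_get?]
        rcases hg : part.get? (u + 1) with _ | v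
        · rfl
        · exfalso
          have := PySem.Dict.mem_items_of_get?_eq_some part hg
          rw [hitems] at this
          rcases List.mem_map.mp this with ⟨k, hk, hkeq⟩
          have : (k : Int) = u + 1 := congrArg Prod.fst hkeq
          have hklt : k < free.length := List.mem_range.mp hk
          omega
      have hA : pvGoA ((i, f) :: rest) part ((t0, w0) :: lib) u
          = pvGoA rest (part.insert (u + 1) (PySem.Set.ofList [(i, f)]))
              (pvHeapPush (f + 1, u + 1) ((t0, w0) :: lib)) (u + 1) := by
        simp [pvGoA, hcond]
      have hB : pvAssignB ((i, f) :: rest) free acc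
          = pvAssignB rest (free ++ [f + 1]) (acc ++ [((free.length : Int), (i, f))]) := by
        simp [pvAssignB, hmin, hcondm]
      rw [hA, hB]
      apply ih
      refine ⟨?_, ?_, ?_, ?_, ?_, ?_⟩
      · have p1 : (pvHeapPush (f + 1, u + 1) ((t0, w0) :: lib)).Perm ((f + 1, u + 1) :: (t0, w0) :: lib) :=
          pvHeapPush_perm _ _
        have p2 : ((f + 1, u + 1) :: (t0, w0) :: lib).Perm ((f + 1, u + 1) :: pvPairs free) := hperm.cons _
        have p3 : ((f + 1, u + 1) :: pvPairs free).Perm (pvPairs (free ++ [f + 1])) := by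
          rw [pvPairs_append, hK]
          exact (List.perm_append_singleton _ _).symm
        exact p1.trans (p2.trans p3)
      · refine pvHeapPush_pairwise hsort ?_
        intro y hy hxy
        have := hidlt y hy
        rw [← hxy] at this
        simp only at this
        omega
      · simp only [List.length_append, List.length_singleton]
        push_cast
        omega
      · rw [PySem.Dict.items_insert_of_not_contains part _ hcont, hitems]
        simp only [List.length_append, List.length_singleton, List.range_succ, List.map_append]
        congr 1
        · apply List.map_congr_left
          intro k hk
          have hklt : k < free.length := List.mem_range.mp hk
          rw [pvGroupB_append_ne _ _ (by
            intro h
            have : k = free.length := by exact_mod_cast h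
            omega)]
        · rw [hK]
          simp only [List.map_cons, List.map_nil]
          congr 1
          rw [pvGroupB_fresh (fun p hp => by have := hbnd p hp; omega) (i, f)]
      · intro p hp
        rcases List.mem_append.mp hp with hp | hp
        · have := hbnd p hp
          simp only [List.length_append, List.length_singleton]
          push_cast
          omega
        · simp only [List.mem_singleton] at hp
          subst hp
          simp only [List.length_append, List.length_singleton]
          constructor
          · exact Int.natCast_nonneg _
          · push_cast; omega
      · simp

-- ===== VERDICT (by name: the statement is the Claim_ definition above) =====
theorem partizionamento_attivita_spec : Claim_equal_partizionamento_attivita := by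
  intro lista _
  unfold Spec_partizionamento_attivita partizionamento_attivita partizionamento_attivita_alt
  rw [pvItems_range]
  apply pvSim
  refine ⟨by decide, by simp, by decide, by decide, by simp, by simp⟩
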